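-- pv_equiv track=rewrite | github.com/poluzerovT/mms-10-2025 | Lyashuk/Lab2.py | calculate_dominant_series
-- ===== SOURCE A (Python) =====
-- def calculate_dominant_series(scores_a, scores_b):
--     max_series = 0
--     c_series = 0
--     for score_a, score_b in zip(scores_a, scores_b):
--         if score_a == 5 and score_b == 0:
--             c_series += 1
--             max_series = max(max_series, c_series)
--         else:
--             c_series = 0
--
--     return max_series
-- ===== SOURCE B (Python) =====
-- def calculate_dominant_series(scores_a, scores_b):
--     flags = [a == 5 and b == 0 for a, b in zip(scores_a, scores_b)]
--     runs = []
--     i = 0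
--     n = len(flags)
--     while i < n:
--         if flags[i]:
--             j = i
--             while j < n and flags[j]:
--                 j += 1
--             runs.append(j - i)
--             i = j
--         else:
--             i += 1
--     return max(runs, default=0)
-- ===== Notes on version B (the rewrite author's own statement) =====
-- stated objective: alternative
-- what changed: Replaces the running-counter-with-reset loop by a segmentation pass: build a boolean flag list, collect the lengths of maximal consecutive True runs, then take the maximum (default 0).
import Mathlib
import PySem

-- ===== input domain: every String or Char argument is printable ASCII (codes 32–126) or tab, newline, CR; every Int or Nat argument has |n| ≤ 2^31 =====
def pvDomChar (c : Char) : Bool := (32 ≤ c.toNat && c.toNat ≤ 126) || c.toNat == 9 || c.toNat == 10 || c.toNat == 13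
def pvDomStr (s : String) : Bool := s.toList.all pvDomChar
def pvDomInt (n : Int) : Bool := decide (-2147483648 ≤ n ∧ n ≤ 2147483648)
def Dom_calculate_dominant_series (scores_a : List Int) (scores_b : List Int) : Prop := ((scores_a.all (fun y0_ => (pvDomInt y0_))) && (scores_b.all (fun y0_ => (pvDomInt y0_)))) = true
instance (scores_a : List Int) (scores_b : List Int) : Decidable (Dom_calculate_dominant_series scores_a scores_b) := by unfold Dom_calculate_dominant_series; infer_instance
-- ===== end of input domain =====

-- B segments the flag sequence into maximal runs and maximizes run lengths, instead of A's running counter with reset (objective: alternative decomposition, same cost).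

-- ===== PORT A =====
-- running counter with reset; state = (max_series, c_series)
def calculate_dominant_series (scores_a : List Int) (scores_b : List Int) : Int :=
  ((List.zip scores_a scores_b).foldl
    (fun (st : Int × Int) p =>
      if p.1 == 5 && p.2 == 0 then (max st.1 (st.2 + 1), st.2 + 1) else (st.1, 0))
    (0, 0)).1

-- ===== PORT B =====
-- lengths of the maximal runs of True in a flag list (Source B's while-scan:
-- the inner while consuming a run = takeWhile/dropWhile)
def pvRuns : List Bool → List Int
  | [] => []
  | false :: t => pvRuns t
  | true :: t => ((t.takeWhile id).length + 1 : Int) :: pvRuns (t.dropWhile id)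
termination_by fs => fs.length
decreasing_by
  · simp
  · exact Nat.lt_succ_of_le (t.length_dropWhile_le id)

def calculate_dominant_series_alt (scores_a : List Int) (scores_b : List Int) : Int :=
  let flags := (List.zip scores_a scores_b).map (fun p => p.1 == 5 && p.2 == 0)
  (pvRuns flags).foldl max 0   -- max(runs, default=0)

-- ===== PRECONDITION & SPEC =====
def Spec_calculate_dominant_series (scores_a : List Int) (scores_b : List Int) (out : Int) : Prop := out = calculate_dominant_series_alt scores_a scores_b
instance (scores_a : List Int) (scores_b : List Int) (out : Int) : Decidable (Spec_calculate_dominant_series scores_a scores_b out) := by unfold Spec_calculate_dominant_series; infer_instance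

-- ===== CLAIM (what is proved, stated in full; the proofs are below) =====
def Claim_equal_calculate_dominant_series : Prop := ∀ (scores_a : List Int) (scores_b : List Int), Dom_calculate_dominant_series scores_a scores_b → Spec_calculate_dominant_series scores_a scores_b (calculate_dominant_series scores_a scores_b)

-- ===== LEMMAS AND PROOFS =====

-- A's loop, rephrased over the flag list (proved equal to A's foldl over pairs below)
def pvLoopA : List Bool → Int → Int → Int
  | [], m, _ => m
  | f :: t, m, c => if f then pvLoopA t (max m (c + 1)) (c + 1) else pvLoopA t m 0

theorem pvLoopA_eq_fold (ps : List (Int × Int)) (m c : Int) :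
    (ps.foldl (fun (st : Int × Int) p =>
      if p.1 == 5 && p.2 == 0 then (max st.1 (st.2 + 1), st.2 + 1) else (st.1, 0)) (m, c)).1
    = pvLoopA (ps.map (fun p => p.1 == 5 && p.2 == 0)) m c := by
  induction ps generalizing m c with
  | nil => rfl
  | cons p t ih =>
      cases h : (p.1 == 5 && p.2 == 0) <;>
        simp only [List.foldl_cons, List.map_cons, pvLoopA, h, if_true, Bool.false_eq_true,
          if_false] <;> exact ih _ _

-- consuming one maximal run: loopA over t with active count c (c ≤ m) equals
-- loopA restarted after the run, with m maxed with the run's total length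
theorem pvLoopA_run (t : List Bool) (m c : Int) (hc : 0 ≤ c) (hcm : c ≤ m) :
    pvLoopA t m c = pvLoopA (t.dropWhile id) (max m (c + (t.takeWhile id).length)) 0 := by
  induction t generalizing m c with
  | nil =>
      simp [pvLoopA]
      omega
  | cons f t ih =>
      cases f with
      | false =>
          simp [pvLoopA, List.takeWhile, List.dropWhile]
          have : max m c = m := by omega
          simp [this]
      | true =>
          simp only [pvLoopA, List.takeWhile, List.dropWhile, id, if_true, List.length_cons]
          rw [ih (max m (c + 1)) (c + 1) (by omega) (by omega)]
          have hlen : (0:Int) ≤ ((List.takeWhile id t).length : Int) := Int.natCast_nonneg _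
          have hmax : max (max m (c+1)) ((c+1) + ((List.takeWhile id t).length:Int))
              = max m (c + (((List.takeWhile id t).length:Int) + 1)) := by omega
          push_cast
          rw [hmax]

theorem pvLoopA_runs (fs : List Bool) (m : Int) :
    pvLoopA fs m 0 = (pvRuns fs).foldl max m := by
  induction fs using pvRuns.induct generalizing m with
  | case1 => simp [pvLoopA, pvRuns]
  | case2 t ih => simpa [pvLoopA, pvRuns] using ih m
  | case3 t ih =>
      simp only [pvLoopA, if_true, pvRuns, List.foldl_cons, zero_add]
      rw [pvLoopA_run t (max m 1) 1 (by omega) (by omega)]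
      rw [ih]
      have hlen : (0 : Int) ≤ ((t.takeWhile id).length : Int) := Int.natCast_nonneg _
      have hmax : max (max m 1) (1 + ((t.takeWhile id).length : Int))
          = max m (((t.takeWhile id).length : Int) + 1) := by omega
      rw [hmax]

-- ===== VERDICT (by name: the statement is the Claim_ definition above) =====
theorem calculate_dominant_series_spec : Claim_equal_calculate_dominant_series := by
  intro sa sb _
  unfold Spec_calculate_dominant_series calculate_dominant_series calculate_dominant_series_alt
  rw [pvLoopA_eq_fold, pvLoopA_runs]
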